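-- pv_equiv track=rewrite | github.com/hldai/nvitp | data/bowdataset.py | __get_word_cnt_tups
-- ===== SOURCE A (Python) =====
-- def __get_word_cnt_tups(words, vocab):
--     word_idx_cnt_dict = dict()
--     for w in words:
--         idx = vocab.get(w, -1)
--         if idx < 0:
--             continue
--         cnt = word_idx_cnt_dict.get(idx, 0)
--         word_idx_cnt_dict[idx] = cnt + 1
--     word_idx_cnt_tups = list(word_idx_cnt_dict.items())
--     word_idx_cnt_tups.sort(key=lambda x: x[0])
--     return word_idx_cnt_tups
-- ===== SOURCE B (Python) =====
-- def __get_word_cnt_tups(words, vocab):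
--     idxs = sorted(i for i in (vocab.get(w, -1) for w in words) if i >= 0)
--     tups = []
--     for i in idxs:
--         if tups and tups[-1][0] == i:
--             tups[-1] = (i, tups[-1][1] + 1)
--         else:
--             tups.append((i, 1))
--     return tups
-- ===== Notes on version B (the rewrite author's own statement) =====
-- stated objective: alternative
-- what changed: Replaces the counting dict plus key-sort with: collect valid indices, sort them once, then one run-length sweep that emits (idx,count) pairs already ascending.
import Mathlib
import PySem

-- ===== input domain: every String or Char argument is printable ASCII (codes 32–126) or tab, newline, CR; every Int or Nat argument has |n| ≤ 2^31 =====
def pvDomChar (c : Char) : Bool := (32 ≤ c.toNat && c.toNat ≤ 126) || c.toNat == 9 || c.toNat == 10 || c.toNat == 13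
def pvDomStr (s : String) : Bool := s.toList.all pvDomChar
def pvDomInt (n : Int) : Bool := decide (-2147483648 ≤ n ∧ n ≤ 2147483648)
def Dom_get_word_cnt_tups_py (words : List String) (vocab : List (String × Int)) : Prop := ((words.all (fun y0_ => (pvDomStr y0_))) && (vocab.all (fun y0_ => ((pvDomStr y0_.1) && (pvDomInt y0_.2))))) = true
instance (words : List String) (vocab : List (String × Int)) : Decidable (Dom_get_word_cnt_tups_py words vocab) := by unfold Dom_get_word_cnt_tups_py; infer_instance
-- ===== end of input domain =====

-- B replaces A's counting dict + key-sort by sort-the-valid-indices once, then one run-length sweep (alternative decomposition, same result).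

-- ===== PORT A =====
def get_word_cnt_tups_py (words : List String) (vocab : List (String × Int)) : List (Int × Int) :=
  let d : PySem.Dict Int Int := words.foldl (fun d w =>
      let idx := (PySem.Dict.mk vocab).getD w (-1)
      if idx < 0 then d
      else d.insert idx (d.getD idx 0 + 1)) PySem.Dict.empty
  PySem.List.sorted d.items (fun x => x.1) false

-- ===== PORT B =====
-- one step of Source B's run-length loop: extend the last run or start a new one
def bStep (tups : List (Int × Int)) (i : Int) : List (Int × Int) :=
  match tups.getLast? with
  | some last => if last.1 == i then tups.dropLast ++ [(i, last.2 + 1)] else tups ++ [(i, 1)]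
  | none => tups ++ [(i, 1)]

def get_word_cnt_tups_py_alt (words : List String) (vocab : List (String × Int)) : List (Int × Int) :=
  let idxs := PySem.List.sorted
      ((words.map (fun w => (PySem.Dict.mk vocab).getD w (-1))).filter (fun i => decide (0 ≤ i)))
      (fun x => x) false
  idxs.foldl bStep []

-- ===== PRECONDITION & SPEC =====
def Spec_get_word_cnt_tups_py (words : List String) (vocab : List (String × Int)) (out : List (Int × Int)) : Prop := out = get_word_cnt_tups_py_alt words vocab
instance (words : List String) (vocab : List (String × Int)) (out : List (Int × Int)) : Decidable (Spec_get_word_cnt_tups_py words vocab out) := by unfold Spec_get_word_cnt_tups_py; infer_instance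

-- ===== CLAIM (what is proved, stated in full; the proofs are below) =====
def Claim_equal_get_word_cnt_tups_py : Prop := ∀ (words : List String) (vocab : List (String × Int)), Dom_get_word_cnt_tups_py words vocab → Spec_get_word_cnt_tups_py words vocab (get_word_cnt_tups_py words vocab)

-- ===== LEMMAS AND PROOFS =====

-- A's loop over words is the counting loop over the valid indices only
theorem foldA (f : String → Int) : ∀ (ws : List String) (d : PySem.Dict Int Int),
    ws.foldl (fun d w =>
      let idx := f w
      if idx < 0 then d
      else d.insert idx (d.getD idx 0 + 1)) d
    = ((ws.map f).filter (fun i => decide (0 ≤ i))).foldl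
        (fun d x => d.insert x (d.getD x 0 + 1)) d := by
  intro ws
  induction ws with
  | nil => intro d; rfl
  | cons w ws ih =>
    intro d
    by_cases h : f w < 0
    · simp [List.foldl, h, ih, show ¬ (0 ≤ f w) by omega]
    · simp [List.foldl, h, ih, show 0 ≤ f w by omega]

theorem foldl_add_acc : ∀ (l : List Int) (s : List Int),
    l.foldl PySem.Set.add s = s ++ (PySem.Set.ofList l).filter (fun x => !(s.contains x)) := by
  intro l
  induction l with
  | nil => intro s; simp [PySem.Set.ofList]
  | cons a l ih =>
    intro s
    have h1 : PySem.Set.ofList (a :: l) = [a] ++ (PySem.Set.ofList l).filter (fun x => !(([a] : List Int).contains x)) := by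
      show (a :: l).foldl PySem.Set.add [] = _
      rw [List.foldl_cons, ih]
      simp [PySem.Set.add, PySem.Set.contains]
    rw [List.foldl_cons, ih, h1]
    by_cases h : a ∈ s
    · simp [PySem.Set.add, PySem.Set.contains, h, List.filter_filter]
      apply List.filter_congr
      intro x hx
      simp
      intro hxs
      rintro rfl; exact hxs h
    · simp [PySem.Set.add, PySem.Set.contains, h, List.filter_filter]
theorem dedup_cons (a : Int) (l : List Int) :
    PySem.List.dedup (a :: l) = a :: (PySem.List.dedup l).filter (fun x => !(x == a)) := by
  have : PySem.List.dedup (a :: l) = (a :: l).foldl PySem.Set.add [] := rfl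
  rw [this, List.foldl_cons]
  have h2 : PySem.Set.add ([] : List Int) a = [a] := by simp [PySem.Set.add, PySem.Set.contains]
  rw [h2, foldl_add_acc]
  show [a] ++ (PySem.Set.ofList l).filter (fun x => !(([a] : List Int).contains x)) = a :: (PySem.Set.ofList l).filter (fun x => !(x == a))
  simp only [List.singleton_append, List.cons.injEq, true_and]
  apply List.filter_congr
  intro x hx
  rcases eq_or_ne x a with rfl | hne
  · simp
  · simp [hne]

theorem dedup_sublist (l : List Int) : (PySem.List.dedup l).Sublist l := by
  induction l with
  | nil => simp [PySem.List.dedup, PySem.Set.ofList]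
  | cons a l ih =>
    rw [dedup_cons]
    exact List.Sublist.cons₂ a (List.Sublist.trans List.filter_sublist ih)
def rleRun (k c : Int) : List Int → List (Int × Int)
  | [] => [(k, c)]
  | i :: s => if i = k then rleRun k (c + 1) s else (k, c) :: rleRun i 1 s

theorem foldl_bStep_run : ∀ (s : List Int) (acc : List (Int × Int)) (k c : Int),
    (s.foldl bStep (acc ++ [(k, c)])) = acc ++ rleRun k c s := by
  intro s
  induction s with
  | nil => intro acc k c; simp [rleRun]
  | cons i s ih =>
    intro acc k c
    rw [List.foldl_cons]
    have hb : bStep (acc ++ [(k, c)]) i =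
        if i = k then acc ++ [(k, c + 1)] else (acc ++ [(k, c)]) ++ [(i, 1)] := by
      simp only [bStep, List.getLast?_concat, List.dropLast_concat]
      rcases eq_or_ne i k with rfl | hne
      · simp
      · simp [hne, Ne.symm hne]
    rw [hb, rleRun]
    rcases eq_or_ne i k with rfl | hne
    · simp only [if_true]
      rw [ih]
    · simp only [if_neg hne, List.append_assoc]
      rw [show acc ++ ([(k, c)] ++ [(i, 1)]) = (acc ++ [(k, c)]) ++ [(i, 1)] by simp,
          ih (acc ++ [(k, c)]) i 1]
      simp
theorem rleRun_spec : ∀ (s : List Int), s.Pairwise (· ≤ ·) → ∀ (k : Int), (∀ j ∈ s, k ≤ j) → ∀ (c : Int),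
    rleRun k c s = (k, c + (s.count k : Int)) ::
      ((PySem.List.dedup s).filter (fun x => !(x == k))).map (fun j => (j, (s.count j : Int))) := by
  intro s
  induction s with
  | nil =>
    intro _ k _ c
    simp [rleRun]
  | cons i s ih =>
    intro hp k hk c
    have hps : s.Pairwise (· ≤ ·) := hp.tail
    have hle : ∀ j ∈ s, i ≤ j := fun j hj => List.rel_of_pairwise_cons hp hj
    rw [rleRun]
    rcases eq_or_ne i k with rfl | hne
    · rw [if_pos rfl, ih hps i hle (c + 1)]
      have htail : (PySem.List.dedup (i :: s)).filter (fun x => !(x == i))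
          = (PySem.List.dedup s).filter (fun x => !(x == i)) := by
        rw [dedup_cons]
        simp [List.filter_filter]
      rw [htail]
      congr 1
      · have h1 : ((i :: s).count i : Int) = (s.count i : Int) + 1 := by
          simp
        rw [h1]; ring_nf
      · apply List.map_congr_left
        intro j hj
        have hji : ¬ (j = i) := by simpa using List.of_mem_filter hj
        have hij : ¬ (i = j) := fun h => hji h.symm
        simp [hij]
    · have hki : k < i := lt_of_le_of_ne (hk i (by simp)) (Ne.symm hne)
      have hnk : ∀ j ∈ s, j ≠ k := fun j hj => by have := hle j hj; omega
      have hcnt0 : (i :: s).count k = 0 := by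
        rw [List.count_eq_zero]
        intro hmem
        rcases List.mem_cons.mp hmem with rfl | h
        · omega
        · exact hnk _ h rfl
      rw [if_neg hne, ih hps i hle 1, dedup_cons]
      have htail : ((i :: (PySem.List.dedup s).filter (fun x => !(x == i))).filter (fun x => !(x == k)))
          = i :: (PySem.List.dedup s).filter (fun x => !(x == i)) := by
        rw [List.filter_cons]
        rw [if_pos (by simpa using hne)]
        congr 1
        rw [List.filter_eq_self]
        intro j hj
        have hjs : j ∈ s := by
          have := List.mem_of_mem_filter hj
          exact (PySem.List.mem_dedup _ _).mp this
        simpa using hnk j hjs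
      rw [htail]
      congr 1
      · rw [hcnt0]; simp
      rw [List.map_cons]
      congr 1
      · have h1 : ((i :: s).count i : Int) = (s.count i : Int) + 1 := by
          simp
        rw [h1]; ring_nf
      · apply List.map_congr_left
        intro j hj
        have hji : ¬ (j = i) := by simpa using List.of_mem_filter hj
        have hij : ¬ (i = j) := fun h => hji h.symm
        simp [hij]
theorem rle_of_sorted (t : List Int) (h : t.Pairwise (· ≤ ·)) :
    t.foldl bStep [] = (PySem.List.dedup t).map (fun j => (j, (t.count j : Int))) := by
  cases t with
  | nil => rfl
  | cons i s =>
    have hle : ∀ j ∈ s, i ≤ j := fun j hj => List.rel_of_pairwise_cons h hj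
    have h1 : (i :: s).foldl bStep [] = rleRun i 1 s := by
      rw [List.foldl_cons]
      have : bStep [] i = ([] : List (Int × Int)) ++ [(i, 1)] := rfl
      rw [this, foldl_bStep_run s [] i 1]
      simp
    rw [h1, rleRun_spec s h.tail i hle 1, dedup_cons, List.map_cons]
    congr 1
    · have hc : ((i :: s).count i : Int) = (s.count i : Int) + 1 := by
        simp
      rw [hc]; ring_nf
    · apply List.map_congr_left
      intro j hj
      have hji : ¬ (j = i) := by simpa using List.of_mem_filter hj
      have hij : ¬ (i = j) := fun hh => hji hh.symm
      simp [hij]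
theorem core (idxs : List Int) :
    PySem.List.sorted (PySem.Dict.counter idxs).items (fun x => x.1) false
    = (PySem.List.sorted idxs (fun x => x) false).foldl bStep [] := by
  have ht_pair : (PySem.List.sorted idxs (fun x => x) false).Pairwise (· ≤ ·) := by
    simpa using PySem.List.sorted_pairwise idxs (fun x => x)
  rw [rle_of_sorted _ ht_pair]
  have hcnt : ∀ j : Int, (PySem.List.sorted idxs (fun x => x) false).count j = idxs.count j :=
    fun j => (PySem.List.sorted_perm idxs (fun x => x) false).count_eq j
  have hfun : (fun j : Int => (j, ((PySem.List.sorted idxs (fun x => x) false).count j : Int)))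
      = (fun j : Int => (j, (idxs.count j : Int))) := by
    funext j; rw [hcnt]
  rw [hfun]
  have hded : PySem.List.dedup (PySem.List.sorted idxs (fun x => x) false)
      = PySem.List.sorted (PySem.Set.ofList idxs) (fun x => x) false := by
    apply Eq.symm
    apply PySem.List.sorted_eq_of_perm_of_pairwise_lt
    · rw [List.perm_ext_iff_of_nodup (PySem.List.nodup_dedup _) (PySem.Set.nodup_ofList _)]
      intro a
      rw [PySem.List.mem_dedup, PySem.List.mem_sorted, PySem.Set.mem_ofList]
    · have hsub := dedup_sublist (PySem.List.sorted idxs (fun x => x) false)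
      have hle := ht_pair.sublist hsub
      have hnd : (PySem.List.dedup (PySem.List.sorted idxs (fun x => x) false)).Pairwise (· ≠ ·) :=
        PySem.List.nodup_dedup _
      exact (hle.and hnd).imp (fun h => lt_of_le_of_ne h.1 h.2)
  rw [hded, PySem.Dict.items_counter]
  apply PySem.List.sorted_eq_of_perm_of_pairwise_lt
  · exact ((PySem.List.sorted_perm (PySem.Set.ofList idxs) (fun x => x) false).map _)
  · apply List.Pairwise.map
    · intro a b hab
      exact hab
    · exact PySem.List.sorted_ofList_pairwise_lt idxs

-- ===== VERDICT (by name: the statement is the Claim_ definition above) =====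
theorem get_word_cnt_tups_py_spec : Claim_equal_get_word_cnt_tups_py := by
  intro words vocab _
  unfold Spec_get_word_cnt_tups_py get_word_cnt_tups_py get_word_cnt_tups_py_alt
  rw [foldA (fun w => (PySem.Dict.mk vocab).getD w (-1)) words PySem.Dict.empty]
  rw [PySem.Dict.foldl_insert_getD_add_one_eq_counter]
  exact core _
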